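-- pv_equiv track=rewrite | github.com/TERADA-DANTE/algorithm | python/acmicpc/_1947.py | solution
-- ===== SOURCE A (Python) =====
-- def solution(n):
--     numbers = [None, 0, 1] + [None]*(n-2)
--     if n == 1:
--         return 0
--     elif n == 2:
--         return 1
--     for i in range(3, n+1):
--         numbers[i] = ((i-1) * (numbers[i-1] + numbers[i-2])) % 1000000000
--     return numbers[-1] % 1000000000
-- ===== SOURCE B (Python) =====
-- def solution(n):
--     d = 1
--     for i in range(1, n + 1):
--         d = (i * d + (-1) ** i) % 1000000000
--     return d
-- ===== Notes on version B (the rewrite author's own statement) =====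
-- stated objective: simpler
-- what changed: Replaces the two-term derangement recurrence D(n)=(n-1)(D(n-1)+D(n-2)) with an O(n+1)-sized table and small-case branches by the one-term recurrence D(n)=n*D(n-1)+(-1)^n carried in a single running variable, no array and no branches.
import Mathlib
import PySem

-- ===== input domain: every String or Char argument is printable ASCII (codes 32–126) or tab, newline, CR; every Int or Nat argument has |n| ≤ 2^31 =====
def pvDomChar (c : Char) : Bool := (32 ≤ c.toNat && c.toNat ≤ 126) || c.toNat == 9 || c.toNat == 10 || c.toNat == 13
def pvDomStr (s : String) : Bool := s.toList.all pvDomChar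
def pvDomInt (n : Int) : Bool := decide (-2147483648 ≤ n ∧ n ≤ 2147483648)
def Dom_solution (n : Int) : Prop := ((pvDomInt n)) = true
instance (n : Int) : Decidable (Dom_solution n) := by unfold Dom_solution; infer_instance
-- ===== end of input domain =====

-- B replaces A's two-term derangement recurrence with its table and small-case branches by the
-- one-term recurrence D(n)=n*D(n-1)+(-1)^n carried in a single running variable (simpler, O(1) space).


-- ===== PORT A =====
-- loop body of 'for i in range(3, n+1): numbers[i] = ((i-1)*(numbers[i-1]+numbers[i-2])) % 1000000000'
def stepA (ns : List Int) (i : Int) : List Int :=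
  PySem.List.pySetD ns i
    (PySem.Int.mod ((i - 1) * (PySem.List.pyGetD ns (i - 1) 0 + PySem.List.pyGetD ns (i - 2) 0)) 1000000000)

-- Python's None placeholders are represented by 0: they are never read before being written
-- (index 0 is never read; indices ≥ 3 are written before any read), so the value is exact.
-- '[None]*(n-2)' is [] for n < 2, which '(n-2).toNat' reproduces exactly.
def solution (n : Int) : Int :=
  let numbers : List Int := [0, 0, 1] ++ List.replicate (n - 2).toNat 0
  if n = 1 then 0
  else if n = 2 then 1
  else
    let numbers := (PySem.List.pyRange 3 (n + 1) 1).foldl stepA numbers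
    PySem.Int.mod (PySem.List.pyGetD numbers (-1) 0) 1000000000

-- ===== PORT B =====
-- loop body of 'for i in range(1, n+1): d = (i*d + (-1)**i) % 1000000000'  (i ≥ 1, so i.toNat is exact)
def stepB (d : Int) (i : Int) : Int :=
  PySem.Int.mod (i * d + (-1) ^ i.toNat) 1000000000

def solution_alt (n : Int) : Int :=
  (PySem.List.pyRange 1 (n + 1) 1).foldl stepB 1

-- ===== PRECONDITION & SPEC =====
def Spec_solution (n : Int) (out : Int) : Prop := out = solution_alt n
instance (n : Int) (out : Int) : Decidable (Spec_solution n out) := by unfold Spec_solution; infer_instance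

-- ===== CLAIM (what is proved, stated in full; the proofs are below) =====
def Claim_equal_solution : Prop := ∀ (n : Int), Dom_solution n → Spec_solution n (solution n)

-- ===== LEMMAS AND PROOFS =====

-- the sequence computed by B's single-variable loop
def f : Nat → Int
  | 0 => 1
  | (k+1) => PySem.Int.mod (((k : Int) + 1) * f k + (-1) ^ (k + 1)) 1000000000

lemma f_mod (k : Nat) : f (k + 1) % 1000000000 = f (k + 1) := by
  conv_lhs => rw [f]
  conv_rhs => rw [f]
  rw [PySem.Int.mod_eq_emod_of_pos (by norm_num)]
  exact Int.emod_emod_of_dvd _ dvd_rfl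

-- the identity linking the two recurrences mod 10^9
lemma f_two_term (t : Nat) :
    f (t + 2) = PySem.Int.mod (((t : Int) + 1) * (f (t + 1) + f t)) 1000000000 := by
  have hM : (0:Int) < 1000000000 := by norm_num
  conv_lhs => rw [f]
  rw [PySem.Int.mod_eq_emod_of_pos hM, PySem.Int.mod_eq_emod_of_pos hM]
  -- f (t+1) ≡ (t+1) * f t + (-1)^(t+1)  [ZMOD 10^9]
  have ha : f (t + 1) ≡ ((t : Int) + 1) * f t + (-1) ^ (t + 1) [ZMOD (1000000000:Int)] := by
    show f (t + 1) % 1000000000 = _ % 1000000000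
    rw [f_mod, f, PySem.Int.mod_eq_emod_of_pos hM]
  have h1 : ((t : Int) + 1 + 1) * f (t + 1) + (-1) ^ (t + 2) ≡
      ((t : Int) + 1 + 1) * (((t : Int) + 1) * f t + (-1) ^ (t + 1)) + (-1) ^ (t + 2)
      [ZMOD (1000000000:Int)] := (ha.mul_left _).add_right _
  have h2 : ((t : Int) + 1) * (f (t + 1) + f t) ≡
      ((t : Int) + 1) * ((((t : Int) + 1) * f t + (-1) ^ (t + 1)) + f t)
      [ZMOD (1000000000:Int)] := ((ha.add_right _).mul_left _)
  have key : ((t : Int) + 1 + 1) * (((t : Int) + 1) * f t + (-1) ^ (t + 1)) + (-1) ^ (t + 2) =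
      ((t : Int) + 1) * ((((t : Int) + 1) * f t + (-1) ^ (t + 1)) + f t) := by
    have hp : ((-1 : Int)) ^ (t + 2) = -((-1 : Int) ^ (t + 1)) := by
      rw [pow_succ]; ring
    rw [hp]; ring
  have : ((t : Int) + 1 + 1) * f (t + 1) + (-1) ^ (t + 2) ≡
      ((t : Int) + 1) * (f (t + 1) + f t) [ZMOD (1000000000:Int)] :=
    (h1.trans (key ▸ Int.ModEq.refl _)).trans h2.symm
  have := this
  have goal := this
  calc (((t : Int) + 1 + 1) * f (t + 1) + (-1) ^ (t + 2)) % 1000000000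
      = (((t : Int) + 1) * (f (t + 1) + f t)) % 1000000000 := goal
  

-- B's fold computes f
lemma alt_fold (m : Nat) :
    (PySem.List.pyRange 1 ((m : Int) + 1) 1).foldl stepB 1 = f m := by
  induction m with
  | zero => rw [PySem.List.pyRange_one_eq_nil (by norm_num)]; rfl
  | succ m ih =>
    have hc : ((m + 1 : Nat) : Int) + 1 = ((m : Int) + 1) + 1 := by push_cast; ring
    rw [hc, PySem.List.pyRange_one_succ_right (by omega), List.foldl_append, ih]
    show PySem.Int.mod (((m : Int) + 1) * f m + (-1) ^ ((m : Int) + 1).toNat) 1000000000 = f (m + 1)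
    have ht : ((m : Int) + 1).toNat = m + 1 := by omega
    rw [ht, f]

lemma alt_eq (n : Int) : solution_alt n = f n.toNat := by
  by_cases h : n ≤ 0
  · have h0 : n.toNat = 0 := by omega
    rw [h0]
    show (PySem.List.pyRange 1 (n + 1) 1).foldl stepB 1 = f 0
    rw [PySem.List.pyRange_one_eq_nil (by omega)]; rfl
  · have hn : n = (n.toNat : Int) := by omega
    show (PySem.List.pyRange 1 (n + 1) 1).foldl stepB 1 = f n.toNat
    rw [hn]
    exact alt_fold n.toNat

-- A's loop invariant: after the iterations i = 3 .. s+2 the list has unchanged length N+1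
-- and holds f j at every index 1 ≤ j ≤ s+2
lemma loopA (N : Nat) (hN : 3 ≤ N) (s : Nat) (hs : s + 2 ≤ N) :
    ((PySem.List.pyRange 3 (((s + 2 : Nat) : Int) + 1) 1).foldl stepA
        ([0, 0, 1] ++ List.replicate (N - 2) (0 : Int))).length = N + 1 ∧
    ∀ j : Nat, 1 ≤ j → j ≤ s + 2 →
      PySem.List.pyGetD ((PySem.List.pyRange 3 (((s + 2 : Nat) : Int) + 1) 1).foldl stepA
        ([0, 0, 1] ++ List.replicate (N - 2) (0 : Int))) (j : Int) 0 = f j := by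
  induction s with
  | zero =>
    rw [PySem.List.pyRange_one_eq_nil (by norm_num)]
    simp only [List.foldl_nil]
    constructor
    · simp [List.length_replicate]; omega
    · intro j h1 h2
      interval_cases j
      · rw [PySem.List.pyGetD_natCast]
        show (0:Int) = f 1
        decide
      · rw [PySem.List.pyGetD_natCast]
        show (1:Int) = f 2
        decide
  | succ s ih =>
    obtain ⟨ihlen, ihget⟩ := ih (by omega)
    have hcast : ((s + 1 + 2 : Nat) : Int) + 1 = (((s + 2 : Nat) : Int) + 1) + 1 := by
      push_cast; ring
    rw [hcast, PySem.List.pyRange_one_succ_right (by push_cast; omega), List.foldl_append]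
    simp only [List.foldl_cons, List.foldl_nil]
    set ns := (PySem.List.pyRange 3 (((s + 2 : Nat) : Int) + 1) 1).foldl stepA
        ([0, 0, 1] ++ List.replicate (N - 2) (0 : Int)) with hns
    have hi3 : ((s + 2 : Nat) : Int) + 1 = ((s + 3 : Nat) : Int) := by push_cast; ring
    have hi1 : ((s + 3 : Nat) : Int) - 1 = ((s + 2 : Nat) : Int) := by push_cast; ring
    have hi2 : ((s + 3 : Nat) : Int) - 2 = ((s + 1 : Nat) : Int) := by push_cast; ring
    have hval : stepA ns (((s + 2 : Nat) : Int) + 1) = ns.set (s + 3) (f (s + 3)) := by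
      rw [stepA, hi3, hi1, hi2]
      rw [ihget (s + 2) (by omega) (by omega), ihget (s + 1) (by omega) (by omega)]
      rw [PySem.List.pySetD_natCast]
      congr 1
      have := f_two_term (s + 1)
      have hc2 : ((s + 1 : Nat) : Int) + 1 = ((s + 2 : Nat) : Int) := by push_cast; ring
      rw [hc2] at this
      rw [← this]
    rw [hval]
    constructor
    · rw [List.length_set]; exact ihlen
    · intro j h1 h2
      have hjset : (ns.set (s + 3) (f (s + 3))) = PySem.List.pySetD ns ((s + 3 : Nat) : Int) (f (s + 3)) := by
        rw [PySem.List.pySetD_natCast]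
      rw [hjset, PySem.List.pyGetD_pySetD_natCast ns (s + 3) j (f (s + 3)) 0 (by omega)]
      by_cases hj : j = s + 3
      · rw [if_pos (by exact_mod_cast congrArg (Nat.cast : Nat → Int) hj)]
        rw [hj]
      · rw [if_neg (by exact_mod_cast hj)]
        exact ihget j h1 (by omega)

lemma a_eq_big (N : Nat) (hN : 3 ≤ N) : solution (N : Int) = f N := by
  obtain ⟨hlen, hget⟩ := loopA N hN (N - 2) (by omega)
  have hN2 : ((N : Int) - 2).toNat = N - 2 := by omega
  have hNc : ((N - 2 + 2 : Nat) : Int) + 1 = (N : Int) + 1 := by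
    have : N - 2 + 2 = N := by omega
    rw [this]
  rw [hNc] at hlen hget
  show (if (N : Int) = 1 then (0:Int) else if (N : Int) = 2 then 1 else
    PySem.Int.mod (PySem.List.pyGetD ((PySem.List.pyRange 3 ((N : Int) + 1) 1).foldl stepA
      ([0, 0, 1] ++ List.replicate ((N : Int) - 2).toNat 0)) (-1) 0) 1000000000) = f N
  rw [if_neg (by omega), if_neg (by omega), hN2]
  set ns := (PySem.List.pyRange 3 ((N : Int) + 1) 1).foldl stepA
      ([0, 0, 1] ++ List.replicate (N - 2) (0:Int)) with hns
  have hlast : PySem.List.pyGetD ns (-1) 0 = f N := by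
    rw [PySem.List.pyGetD_neg_ofNat ns 1 0 (by omega) (by omega)]
    have := hget N (by omega) (by omega)
    rw [PySem.List.pyGetD_natCast] at this
    rw [← this, List.getD_eq_getElem ns 0 (by omega)]
    congr 1
    omega
  rw [hlast]
  have hNe : N = (N - 1) + 1 := by omega
  rw [PySem.Int.mod_eq_emod_of_pos (by norm_num), hNe, f_mod]

-- ===== VERDICT (by name: the statement is the Claim_ definition above) =====
theorem solution_spec : Claim_equal_solution := by
  intro n _
  show solution n = solution_alt n
  rw [alt_eq]
  by_cases h0 : n ≤ 0
  · have ht0 : n.toNat = 0 := by omega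
    rw [ht0]
    show (if n = 1 then (0:Int) else if n = 2 then 1 else
      PySem.Int.mod (PySem.List.pyGetD ((PySem.List.pyRange 3 (n + 1) 1).foldl stepA
        ([0, 0, 1] ++ List.replicate (n - 2).toNat 0)) (-1) 0) 1000000000) = f 0
    rw [if_neg (by omega), if_neg (by omega),
        PySem.List.pyRange_one_eq_nil (by omega),
        show (n - 2).toNat = 0 from by omega]
    decide
  · by_cases h1 : n = 1
    · rw [h1]; decide
    · by_cases h2 : n = 2
      · rw [h2]; decide
      · have hn : n = (n.toNat : Int) := by omega
        rw [hn]
        exact a_eq_big n.toNat (by omega)
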